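-- pv_equiv track=rewrite | github.com/shihwesley/chronicler | packages/chronicler-lite/src/chronicler_lite/skill/index.py | group_by_package
-- ===== SOURCE A (Python) =====
-- def group_by_package(entries: list[dict]) -> dict[str, dict[str, list[dict]]]:
--     """Group entries by package name and subsystem.
--
--     Returns {package_name: {subsystem: [entries]}}.
--     Root files (no packages/ prefix) go under "root".
--     """
--     grouped: dict[str, dict[str, list[dict]]] = {}
--
--     for entry in entries:
--         cid = entry["component_id"]
--         parts = cid.split("/")
--
--         # Detect package: packages/<name>/src/<pkg_name>/...
--         if len(parts) >= 4 and parts[0] == "packages":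
--             package = parts[1]
--             # Find subsystem: everything between the Python package root and the filename
--             # e.g. packages/chronicler-core/src/chronicler_core/drafter/drafter.py
--             # → package="chronicler-core", subsystem="drafter"
--             # Find the src/<pkg>/ prefix end
--             src_idx = None
--             for i, p in enumerate(parts):
--                 if p == "src":
--                     src_idx = i
--                     break
--             if src_idx is not None and src_idx + 2 < len(parts):
--                 # parts after src/<pkg_name>/ but before filename
--                 sub_parts = parts[src_idx + 2 : -1]
--                 subsystem = sub_parts[0] if sub_parts else "(root)"
--             else:
--                 subsystem = "(root)"
--         else:
--             package = "root"
--             subsystem = "(root)"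
--
--         grouped.setdefault(package, {}).setdefault(subsystem, []).append(entry)
--
--     return grouped
-- ===== SOURCE B (Python) =====
-- def _key(entry):
--     """Derive (package, subsystem) for one entry from its component_id path."""
--     parts = entry["component_id"].split("/")
--     if len(parts) < 4 or parts[0] != "packages":
--         return ("root", "(root)")
--     package = parts[1]
--     if "src" in parts:
--         i = parts.index("src")
--         if i + 3 < len(parts):
--             return (package, parts[i + 2])
--     return (package, "(root)")
--
--
-- def group_by_package(entries: list[dict]) -> dict[str, dict[str, list[dict]]]:
--     keyed = [(_key(e), e) for e in entries]
--     packages = list(dict.fromkeys(k[0] for k, _ in keyed))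
--     return {
--         p: {
--             s: [e for k, e in keyed if k == (p, s)]
--             for s in dict.fromkeys(k[1] for k, _ in keyed if k[0] == p)
--         }
--         for p in packages
--     }
-- ===== Notes on version B (the rewrite author's own statement) =====
-- stated objective: alternative
-- what changed: B replaces A's single-pass setdefault accumulation into a mutable nested dict by a declarative two-pass scheme: derive a (package, subsystem) key for each entry once, then build the nested dict with dict comprehensions over the ordered-deduplicated keys, collecting each bucket by filtering the keyed list.
import Mathlib
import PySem

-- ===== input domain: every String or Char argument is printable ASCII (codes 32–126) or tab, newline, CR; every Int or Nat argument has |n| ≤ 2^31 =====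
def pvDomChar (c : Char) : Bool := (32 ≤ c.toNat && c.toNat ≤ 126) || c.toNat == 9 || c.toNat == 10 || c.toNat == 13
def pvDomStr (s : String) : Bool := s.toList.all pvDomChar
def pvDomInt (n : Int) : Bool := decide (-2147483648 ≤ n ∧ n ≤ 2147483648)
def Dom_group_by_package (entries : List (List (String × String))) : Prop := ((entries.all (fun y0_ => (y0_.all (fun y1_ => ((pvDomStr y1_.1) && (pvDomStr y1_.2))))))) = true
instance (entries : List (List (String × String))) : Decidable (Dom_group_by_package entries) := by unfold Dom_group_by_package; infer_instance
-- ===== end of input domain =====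

-- B replaces A's incremental setdefault accumulation by a declarative two-pass grouping:
-- derive a (package, subsystem) key per entry, then build the nested dict by ordered-dedup
-- of the keys and filtering (objective: alternative decomposition; return value only).

-- ===== PORT A =====
-- the 'for i, p in enumerate(parts): if p == "src": src_idx = i; break' loop of A
def pvFindSrc : List String → Nat → Option Nat
  | [], _ => none
  | p :: rest, i => if p = "src" then some i else pvFindSrc rest (i + 1)

-- the body of A's 'for entry in entries' loop; the final line
-- 'grouped.setdefault(package, {}).setdefault(subsystem, []).append(entry)' is exactly
-- grouped[package] = inner where inner[subsystem] = inner.get(subsystem, []) ++ [entry]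
-- (position kept for existing keys, new keys appended), i.e. nested Dict.modify.
def pvGroupStep (grouped : PySem.Dict String (PySem.Dict String (List (List (String × String)))))
    (entry : List (String × String)) :
    PySem.Dict String (PySem.Dict String (List (List (String × String)))) :=
  let cid := ((PySem.Dict.mk entry).get? "component_id").getD ""  -- KeyError excluded by Pre_
  let parts := (PySem.Str.split? cid "/").getD []                  -- sep = "/" ≠ "", never none
  let pkgsub : String × String :=
    if 4 ≤ parts.length ∧ PySem.List.pyGetD parts (0 : Int) "" = "packages" then
      let package := PySem.List.pyGetD parts (1 : Int) ""
      match pvFindSrc parts 0 with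
      | some i =>
        if (i : Int) + 2 < PySem.List.len parts then
          let subParts := PySem.List.slice parts (some ((i : Int) + 2)) (some (-1))
          (package, match subParts with | s0 :: _ => s0 | [] => "(root)")
        else (package, "(root)")
      | none => (package, "(root)")
    else ("root", "(root)")
  grouped.modify pkgsub.1 PySem.Dict.empty
    (fun inner => inner.modify pkgsub.2 [] (fun lst => lst ++ [entry]))

def group_by_package (entries : List (List (String × String))) : List (String × List (String × List (List (String × String)))) :=
  (entries.foldl pvGroupStep PySem.Dict.empty).items.map (fun pr => (pr.1, pr.2.items))

-- ===== PORT B =====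
-- B's _key helper; '"src" in parts' followed by 'parts.index("src")' is the match on index?.
def pvKey (entry : List (String × String)) : String × String :=
  let parts := (PySem.Str.split? (((PySem.Dict.mk entry).get? "component_id").getD "") "/").getD []
  if parts.length < 4 ∨ PySem.List.pyGetD parts (0 : Int) "" ≠ "packages" then ("root", "(root)")
  else
    let package := PySem.List.pyGetD parts (1 : Int) ""
    match PySem.List.index? parts "src" with
    | some i => if i + 3 < parts.length then (package, PySem.List.pyGetD parts ((i : Int) + 2) "") else (package, "(root)")
    | none => (package, "(root)")

def group_by_package_alt (entries : List (List (String × String))) : List (String × List (String × List (List (String × String)))) :=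
  let keyed := entries.map (fun e => (pvKey e, e))
  let packages := PySem.Set.ofList (keyed.map (fun ke => ke.1.1))
  packages.map (fun p =>
    (p, (PySem.Set.ofList ((keyed.filter (fun ke => ke.1.1 == p)).map (fun ke => ke.1.2))).map
        (fun s => (s, (keyed.filter (fun ke => ke.1 == (p, s))).map (fun ke => ke.2)))))

-- ===== PRECONDITION & SPEC =====
-- Pre_ excludes exactly the inputs where A raises KeyError: an entry without "component_id".
def Pre_group_by_package (entries : List (List (String × String))) : Prop :=
  ∀ e ∈ entries, "component_id" ∈ e.map Prod.fst
instance (entries : List (List (String × String))) : Decidable (Pre_group_by_package entries) := by unfold Pre_group_by_package; infer_instance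

def pvWitness_group_by_package : (List (List (String × String))) :=
  [[("component_id", "packages/core/src/core/drafter/d.py")], [("component_id", "a.py")]]

def Spec_group_by_package (entries : List (List (String × String))) (out : List (String × List (String × List (List (String × String))))) : Prop := out = group_by_package_alt entries
def pvOutDecEq : DecidableEq (List (String × List (String × List (List (String × String))))) :=
  @instDecidableEqList _ (fun x y => @instDecidableEqProd _ _ _ (fun u v => @instDecidableEqList _ (fun p q => @instDecidableEqProd _ _ _ (fun m n => @instDecidableEqList _ (fun g h => @instDecidableEqList _ (fun c d => @instDecidableEqProd _ _ _ _ c d) g h) m n) p q) u v) x y)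
instance (entries : List (List (String × String))) (out : List (String × List (String × List (List (String × String))))) : Decidable (Spec_group_by_package entries out) := by unfold Spec_group_by_package; exact pvOutDecEq _ _

-- ===== CLAIM (what is proved, stated in full; the proofs are below) =====
def Claim_equal_group_by_package : Prop := ∀ (entries : List (List (String × String))), Dom_group_by_package entries → Pre_group_by_package entries → Spec_group_by_package entries (group_by_package entries)

-- ===== LEMMAS AND PROOFS =====

-- the canonical "grouped by derived key" form both ports are reduced to (proof-only)
def pvCanon (entries : List (List (String × String))) : List (String × List (String × List (List (String × String)))) :=
  (PySem.Set.ofList (entries.map (fun e => (pvKey e).1))).map (fun p =>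
    (p, (PySem.Set.ofList ((entries.filter (fun e => (pvKey e).1 == p)).map (fun e => (pvKey e).2))).map
        (fun s => (s, (entries.filter (fun e => (pvKey e).1 == p)).filter (fun e => (pvKey e).2 == s)))))

-- pvFindSrc is list.index with an accumulator
theorem pvFindSrc_eq (parts : List String) (i : Nat) :
    pvFindSrc parts i = (PySem.List.index? parts "src").map (· + i) := by
  induction parts generalizing i with
  | nil => rfl
  | cons p rest ih =>
    by_cases hp : p = "src"
    · simp [pvFindSrc, hp, PySem.List.index?, List.idxOf?_cons]
    · have hb : (p == "src") = false := by simp [hp]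
      simp only [pvFindSrc, if_neg hp, ih, PySem.List.index?, List.idxOf?_cons, hb,
        Bool.false_eq_true, if_false, Option.map_map]
      congr 1
      funext k
      simp only [Function.comp_apply]
      omega

-- A's per-entry parse equals B's per-entry parse on the same split path
theorem pvParse_eq (parts : List String) :
    (if 4 ≤ parts.length ∧ PySem.List.pyGetD parts (0 : Int) "" = "packages" then
      match pvFindSrc parts 0 with
      | some i =>
        if (i : Int) + 2 < PySem.List.len parts then
          (PySem.List.pyGetD parts (1 : Int) "",
            match PySem.List.slice parts (some ((i : Int) + 2)) (some (-1)) with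
            | s0 :: _ => s0
            | [] => "(root)")
        else (PySem.List.pyGetD parts (1 : Int) "", "(root)")
      | none => (PySem.List.pyGetD parts (1 : Int) "", "(root)")
    else ("root", "(root)"))
    = (if parts.length < 4 ∨ PySem.List.pyGetD parts (0 : Int) "" ≠ "packages" then ("root", "(root)")
      else
        match PySem.List.index? parts "src" with
        | some i =>
          if i + 3 < parts.length then (PySem.List.pyGetD parts (1 : Int) "", PySem.List.pyGetD parts ((i : Int) + 2) "")
          else (PySem.List.pyGetD parts (1 : Int) "", "(root)")
        | none => (PySem.List.pyGetD parts (1 : Int) "", "(root)")) := by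
  by_cases hC : 4 ≤ parts.length ∧ PySem.List.pyGetD parts (0 : Int) "" = "packages"
  · have hC' : ¬ (parts.length < 4 ∨ PySem.List.pyGetD parts (0 : Int) "" ≠ "packages") := by
      rcases hC with ⟨h1, h2⟩
      rintro (h | h) <;> [omega; exact h h2]
    rw [if_pos hC, if_neg hC', pvFindSrc_eq]
    cases hidx : PySem.List.index? parts "src" with
    | none => rfl
    | some i =>
      simp only [Option.map_some, Nat.add_zero]
      have hlen : PySem.List.len parts = (parts.length : Int) := PySem.List.len_eq parts
      have hcast : ((i : Int) + 2) = (((i + 2 : Nat) : Int)) := by push_cast; ring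
      by_cases h3 : i + 3 < parts.length
      · have h2 : (i : Int) + 2 < PySem.List.len parts := by rw [hlen]; omega
        rw [if_pos h2, if_pos h3, hcast]
        have hs : PySem.List.slice parts (some (((i + 2 : Nat) : Int))) (some (-1))
            = (parts.drop (i + 2)).take (parts.length - 1 - (i + 2)) := by
          simp only [PySem.List.slice, PySem.List.clampIdx_neg_one, PySem.List.clampIdx_natCast]
          rw [Nat.min_eq_left (by omega)]
        rw [hs, List.drop_eq_getElem_cons (by omega : i + 2 < parts.length),
          show parts.length - 1 - (i + 2) = (parts.length - i - 4) + 1 by omega,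
          List.take_succ_cons, PySem.List.pyGetD_natCast]
        rw [List.getD_eq_getElem?_getD, List.getElem?_eq_getElem (by omega : i + 2 < parts.length)]
        rfl
      · by_cases h2 : (i : Int) + 2 < PySem.List.len parts
        · rw [if_pos h2, if_neg h3, hcast]
          have hs : PySem.List.slice parts (some (((i + 2 : Nat) : Int))) (some (-1)) = [] := by
            simp only [PySem.List.slice, PySem.List.clampIdx_neg_one, PySem.List.clampIdx_natCast]
            rw [hlen] at h2
            rw [Nat.min_eq_left (by omega), show parts.length - 1 - (i + 2) = 0 by omega]
            simp
          rw [hs]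
        · rw [if_neg h2, if_neg h3]
  · have hC' : parts.length < 4 ∨ PySem.List.pyGetD parts (0 : Int) "" ≠ "packages" := by
      by_cases h1 : 4 ≤ parts.length
      · exact Or.inr (fun he => hC ⟨h1, he⟩)
      · exact Or.inl (by omega)
    rw [if_neg hC, if_pos hC']

-- the two per-entry computations agree
theorem pvGroupStep_eq (g : PySem.Dict String (PySem.Dict String (List (List (String × String)))))
    (e : List (String × String)) :
    pvGroupStep g e = g.modify (pvKey e).1 PySem.Dict.empty
      (fun inner => inner.modify (pvKey e).2 [] (fun lst => lst ++ [e])) := by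
  unfold pvGroupStep pvKey
  dsimp only
  generalize (PySem.Str.split? (((PySem.Dict.mk e).get? "component_id").getD "") "/").getD [] = parts
  rw [pvParse_eq]

-- getD of a keyed modify-fold is the fold over the matching elements
theorem getD_foldl_modify_key {κ ν β : Type} [BEq κ] [LawfulBEq κ] [DecidableEq κ]
    (l : List β) (k : β → κ) (d0 : ν) (f : β → ν → ν) (d : PySem.Dict κ ν) (c : κ) :
    (l.foldl (fun d x => (d.modify (k x) d0 (f x))) d).getD c d0
      = (l.filter (fun x => k x == c)).foldl (fun v x => f x v) (d.getD c d0) := by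
  induction l generalizing d with
  | nil => rfl
  | cons x t ih =>
    simp only [List.foldl_cons, List.filter_cons]
    by_cases h : k x = c
    · subst h
      simp [ih]
    · simp [ih, PySem.Dict.getD_modify, h, Ne.symm h]

theorem a_eq_canon (entries : List (List (String × String))) :
    group_by_package entries = pvCanon entries := by
  unfold group_by_package pvCanon
  rw [show pvGroupStep = (fun g e => g.modify (pvKey e).1 PySem.Dict.empty
      (fun inner => inner.modify (pvKey e).2 [] (fun lst => lst ++ [e]))) from funext₂ pvGroupStep_eq]
  have hnd := PySem.Dict.nodup_keys_foldl_modify_key entries (fun e => (pvKey e).1) PySem.Dict.empty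
    (fun _ e => (fun inner => inner.modify (pvKey e).2 [] (fun lst => lst ++ [e]))) PySem.Dict.empty
    PySem.Dict.nodup_keys_empty
  have hkeys := PySem.Dict.keys_foldl_modify_key entries (fun e => (pvKey e).1) PySem.Dict.empty
    (fun _ e => (fun inner => inner.modify (pvKey e).2 [] (fun lst => lst ++ [e]))) PySem.Dict.empty
  rw [PySem.Dict.items_eq_map_keys _ hnd PySem.Dict.empty]
  simp only [hkeys, PySem.Dict.keys_empty, PySem.Set.update_nil_left, List.map_map]
  apply List.map_congr_left
  intro p _
  simp only [Function.comp_apply]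
  have hg := getD_foldl_modify_key entries (fun e => (pvKey e).1) PySem.Dict.empty
    (fun e => (fun inner => inner.modify (pvKey e).2 [] (fun lst => lst ++ [e]))) PySem.Dict.empty p
  rw [PySem.Dict.getD_empty] at hg
  simp only [hg]
  congr 1
  have hnd2 := PySem.Dict.nodup_keys_foldl_modify_key (entries.filter (fun e => (pvKey e).1 == p))
    (fun e => (pvKey e).2) [] (fun _ e => (fun lst => lst ++ [e])) PySem.Dict.empty
    PySem.Dict.nodup_keys_empty
  have hkeys2 := PySem.Dict.keys_foldl_modify_key (entries.filter (fun e => (pvKey e).1 == p))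
    (fun e => (pvKey e).2) [] (fun _ e => (fun lst => lst ++ [e])) PySem.Dict.empty
  rw [PySem.Dict.items_eq_map_keys _ hnd2 []]
  simp only [hkeys2, PySem.Dict.keys_empty, PySem.Set.update_nil_left]
  apply List.map_congr_left
  intro s _
  congr 1
  rw [← List.foldl_map (f := fun e => ((pvKey e).2, e))
    (g := fun (d : PySem.Dict String (List (List (String × String)))) pr => d.modify pr.1 [] (fun lst => lst ++ [pr.2]))]
  rw [PySem.Dict.getD_foldl_modify_append]
  simp only [List.filter_map, List.map_map, Function.comp_def]
  simp [List.map_id']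

theorem alt_eq_canon (entries : List (List (String × String))) :
    group_by_package_alt entries = pvCanon entries := by
  unfold group_by_package_alt pvCanon
  have hb : ∀ (x : String × String) (p s : String), (x == (p, s)) = ((x.1 == p) && (x.2 == s)) := by
    intro x p s; cases x; rfl
  simp only [List.map_map, List.filter_map, Function.comp_def]
  apply List.map_congr_left
  intro p _
  simp only [List.map_id']
  congr 1
  apply List.map_congr_left
  intro s _
  congr 1
  rw [List.filter_filter]
  refine List.filter_congr (fun e _ => ?_)
  rw [hb]
  exact Bool.and_comm _ _

theorem group_by_package_eq_alt (entries : List (List (String × String))) :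
    group_by_package entries = group_by_package_alt entries := by
  rw [a_eq_canon, alt_eq_canon]

-- ===== VERDICT (by name: the statement is the Claim_ definition above) =====
theorem group_by_package_spec : Claim_equal_group_by_package := by
  intro entries _ _
  unfold Spec_group_by_package
  exact group_by_package_eq_alt entries
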